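-- pv_equiv track=rewrite | github.com/luismiguells/automatic_fake_news_detection_online_media | code/special_code/12_02_fake_news_identification_liar_nn_fasttext.py | remove_empty_text_data_fasttext
-- ===== SOURCE A (Python) =====
-- def remove_empty_text_data_fasttext(corpus, labels):
--     """
--     Parameters
--     ----------
--     corpus : A list with text data.
--     labels : A list that contains the labels.
--
--     Returns
--     -------
--     corpus : A list without elements of length 0.
--     labels : A list that contains labels, except those whose length
--              in the corpus is equal to 0.
--     """
--     count = 0
--     l_index = []
--     for line in corpus:
--         if len(line) == 0:
--             l_index.append(count)
--         count += 1
--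
--     if len(l_index) > 0:
--         l_index.reverse()
--         for idx in l_index:
--             corpus.pop(idx)
--             labels.pop(idx)
--         return corpus, labels
--     else:
--         return corpus, labels
-- ===== SOURCE B (Python) =====
-- def remove_empty_text_data_fasttext(corpus, labels):
--     """Single backward sweep: pop empty entries (and their labels) as they
--     are found, so no index list needs to be collected first."""
--     for i in range(len(corpus) - 1, -1, -1):
--         if len(corpus[i]) == 0:
--             corpus.pop(i)
--             labels.pop(i)
--     return corpus, labels
-- ===== Notes on version B (the rewrite author's own statement) =====
-- stated objective: simpler
-- what changed: A collects the indices of empty entries in a first pass, reverses that list, and then pops both lists index by index in a second pass; B is one backward sweep that pops an empty entry and its label the moment it is seen, with no auxiliary index list. (Both raise IndexError when an empty entry's index is not a valid labels index; Pre_ excludes exactly those inputs.)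
import Mathlib
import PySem

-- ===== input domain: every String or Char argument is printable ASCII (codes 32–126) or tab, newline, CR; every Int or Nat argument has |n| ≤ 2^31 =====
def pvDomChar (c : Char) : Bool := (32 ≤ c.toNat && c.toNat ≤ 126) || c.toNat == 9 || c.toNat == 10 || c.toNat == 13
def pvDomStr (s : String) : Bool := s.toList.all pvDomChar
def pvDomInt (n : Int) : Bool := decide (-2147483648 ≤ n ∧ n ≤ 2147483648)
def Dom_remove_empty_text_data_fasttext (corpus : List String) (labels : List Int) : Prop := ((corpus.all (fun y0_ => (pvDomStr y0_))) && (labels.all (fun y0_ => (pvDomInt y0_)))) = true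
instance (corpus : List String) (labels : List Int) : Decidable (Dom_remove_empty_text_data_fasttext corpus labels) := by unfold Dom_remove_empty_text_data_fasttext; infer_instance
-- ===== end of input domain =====

-- B replaces A's collect-indices / reverse / pop-in-place two-pass structure by one backward
-- sweep that pops as it scans (objective: simpler). Return-value equivalence only: A (and Source B)
-- mutate their argument lists in place; that side effect is not modelled here.

-- ===== PORT A =====
-- the first loop of A: foldl state = (count, l_index), Python's two mutable variables
def pvCountIdx (corpus : List String) : Int × List Int :=
  corpus.foldl
    (fun st line => (st.1 + 1, if PySem.Str.len line == 0 then st.2 ++ [st.1] else st.2))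
    (0, [])

-- the second loop of A: successive corpus.pop(idx); labels.pop(idx); none = IndexError
def pvPopLoop : List Int → List String → List Int → Option (List String × List Int)
  | [], c, l => some (c, l)
  | idx :: rest, c, l =>
    match PySem.List.pop? c idx with
    | none => none
    | some (_, c') =>
      match PySem.List.pop? l idx with
      | none => none
      | some (_, l') => pvPopLoop rest c' l'

def remove_empty_text_data_fasttext (corpus : List String) (labels : List Int) : List String × List Int :=
  let l_index := (pvCountIdx corpus).2
  if l_index.length > 0 then
    match pvPopLoop l_index.reverse corpus labels with
    | some r => r
    | none => (corpus, labels)   -- labels.pop raised IndexError: excluded by Pre_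
  else
    (corpus, labels)

-- ===== PORT B =====
-- B's single backward loop: for each index, test corpus[i] and pop both lists if empty
def pvBack : List Int → List String → List Int → Option (List String × List Int)
  | [], c, l => some (c, l)
  | i :: rest, c, l =>
    match PySem.List.pyGet? c i with
    | none => none
    | some s =>
      if PySem.Str.len s == 0 then
        match PySem.List.pop? c i with
        | none => none
        | some (_, c') =>
          match PySem.List.pop? l i with
          | none => none
          | some (_, l') => pvBack rest c' l'
      else pvBack rest c l

def remove_empty_text_data_fasttext_alt (corpus : List String) (labels : List Int) : List String × List Int :=
  match pvBack (PySem.List.pyRange ((corpus.length : Int) - 1) (-1) (-1)) corpus labels with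
  | some r => r
  | none => (corpus, labels)   -- labels.pop raised IndexError: excluded by Pre_

-- ===== PRECONDITION & SPEC =====
-- Pre_ excludes exactly the inputs where both programs raise IndexError: some empty corpus
-- entry whose index is not a valid labels index (the pops run in descending index order, so
-- they all succeed iff every empty index is below labels.length).
def Pre_remove_empty_text_data_fasttext (corpus : List String) (labels : List Int) : Prop :=
  ∀ i, i < corpus.length → corpus.getD i "" = "" → i < labels.length
instance (corpus : List String) (labels : List Int) : Decidable (Pre_remove_empty_text_data_fasttext corpus labels) := by unfold Pre_remove_empty_text_data_fasttext; infer_instance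

def pvWitness_remove_empty_text_data_fasttext : List String × List Int := (["a", "", "b c"], [1, -2, 3])

def Spec_remove_empty_text_data_fasttext (corpus : List String) (labels : List Int) (out : List String × List Int) : Prop := out = remove_empty_text_data_fasttext_alt corpus labels
instance (corpus : List String) (labels : List Int) (out : List String × List Int) : Decidable (Spec_remove_empty_text_data_fasttext corpus labels out) := by unfold Spec_remove_empty_text_data_fasttext; infer_instance

-- ===== CLAIM (what is proved, stated in full; the proofs are below) =====
def Claim_equal_remove_empty_text_data_fasttext : Prop := ∀ (corpus : List String) (labels : List Int), Dom_remove_empty_text_data_fasttext corpus labels → Pre_remove_empty_text_data_fasttext corpus labels → Spec_remove_empty_text_data_fasttext corpus labels (remove_empty_text_data_fasttext corpus labels)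


-- ===== LEMMAS AND PROOFS =====

-- the string test both phrasings use, as one boolean
def pvNE (c : String) : Bool := decide (0 < PySem.Str.len c)

theorem pvNE_eq_not_empty (c : String) : pvNE c = !(PySem.Str.len c == 0) := by
  simp only [pvNE, PySem.Str.len_eq]
  by_cases h : c.toList.length = 0
  · simp [h]
  · have hn : c.length ≠ 0 := by rw [← String.length_toList]; exact h
    simp [Nat.pos_of_ne_zero hn, hn]

theorem pvNE_false_iff (c : String) : pvNE c = false ↔ c = "" := by
  simp [pvNE, PySem.Str.len_eq, String.toList_eq_nil_iff]

-- ascending list of empty positions starting at k (proof-side mirror of A's first loop)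
def pvIdxFrom : List String → Int → List Int
  | [], _ => []
  | c :: cs, k => (if PySem.Str.len c == 0 then [k] else []) ++ pvIdxFrom cs (k + 1)

-- the common value both programs compute on the labels side
def pvKeepB : List Bool → List Int → List Int
  | _, [] => []
  | [], x :: ls => x :: pvKeepB [] ls
  | b :: bs, x :: ls => if b then x :: pvKeepB bs ls else pvKeepB bs ls

theorem pvKeepB_nil (ls : List Int) : pvKeepB [] ls = ls := by
  induction ls with
  | nil => rfl
  | cons x ls ih => simp [pvKeepB, ih]

theorem pvCountIdx_foldl (cs : List String) (k : Int) (acc : List Int) :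
    cs.foldl (fun st line => (st.1 + 1, if PySem.Str.len line == 0 then st.2 ++ [st.1] else st.2))
      (k, acc) = (k + cs.length, acc ++ pvIdxFrom cs k) := by
  induction cs generalizing k acc with
  | nil => simp [pvIdxFrom]
  | cons c cs ih =>
    simp only [List.foldl_cons, ih, pvIdxFrom, List.length_cons]
    exact congrArg₂ Prod.mk (by push_cast; ring) (by split <;> simp)

theorem pvCountIdx_eq (corpus : List String) : (pvCountIdx corpus).2 = pvIdxFrom corpus 0 := by
  unfold pvCountIdx
  rw [pvCountIdx_foldl]
  simp

theorem pvIdxFrom_shift (cs : List String) (k : Int) :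
    pvIdxFrom cs (k + 1) = (pvIdxFrom cs k).map (· + 1) := by
  induction cs generalizing k with
  | nil => rfl
  | cons c cs ih => simp only [pvIdxFrom, List.map_append, ih]; split <;> simp

theorem pvIdxFrom_nonneg {cs : List String} {k e : Int} (hk : 0 ≤ k) (he : e ∈ pvIdxFrom cs k) :
    0 ≤ e := by
  induction cs generalizing k with
  | nil => simp [pvIdxFrom] at he
  | cons c cs ih =>
    simp only [pvIdxFrom, List.mem_append] at he
    rcases he with he | he
    · split at he <;> simp_all
    · exact ih (by omega) he

theorem pvIdxFrom_eq_nil_iff (cs : List String) (k : Int) :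
    pvIdxFrom cs k = [] ↔ ∀ s ∈ cs, pvNE s = true := by
  induction cs generalizing k with
  | nil => simp [pvIdxFrom]
  | cons c cs ih =>
    simp only [pvIdxFrom, List.append_eq_nil_iff, List.mem_cons]
    constructor
    · rintro ⟨h1, h2⟩ s hs
      rcases hs with rfl | hs
      · rw [pvNE_eq_not_empty]; split at h1 <;> simp_all
      · exact (ih (k + 1)).1 h2 s hs
    · intro h
      have hc := h c (Or.inl rfl)
      rw [pvNE_eq_not_empty] at hc
      refine ⟨?_, (ih (k + 1)).2 fun s hs => h s (Or.inr hs)⟩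
      split <;> simp_all

theorem pop?_succ {α : Type} (y : α) (ys : List α) (e : Int) (he : 0 ≤ e) :
    PySem.List.pop? (y :: ys) (e + 1) = (PySem.List.pop? ys e).map (fun p => (p.1, y :: p.2)) := by
  simp only [PySem.List.pop?, PySem.List.pyIdx?]
  have h1 : (0:Int) ≤ e + 1 := by omega
  by_cases h : e < (ys.length : Int)
  · have h' : e + 1 < ((y :: ys).length : Int) := by simp; omega
    simp only [if_pos he, if_pos h1, if_pos h, if_pos h']
    have hnat : (e + 1).toNat = e.toNat + 1 := by omega
    simp [hnat]
    cases ys[e.toNat]? <;> rfl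
  · have h' : ¬ e + 1 < ((y :: ys).length : Int) := by simp; omega
    simp [if_pos he, if_pos h1, if_neg h, h']

theorem pyGet?_succ {α : Type} (y : α) (ys : List α) (e : Int) (he : 0 ≤ e) :
    PySem.List.pyGet? (y :: ys) (e + 1) = PySem.List.pyGet? ys e := by
  simp only [PySem.List.pyGet?, PySem.List.pyIdx?]
  have h1 : (0:Int) ≤ e + 1 := by omega
  by_cases h : e < (ys.length : Int)
  · have h' : e + 1 < ((y :: ys).length : Int) := by simp; omega
    simp only [if_pos he, if_pos h1, if_pos h, if_pos h']
    have hnat : (e + 1).toNat = e.toNat + 1 := by omega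
    simp [hnat]
  · have h' : ¬ e + 1 < ((y :: ys).length : Int) := by simp; omega
    simp [if_pos he, if_pos h1, if_neg h, h']

theorem pvPopLoop_append (E1 E2 : List Int) (c : List String) (l : List Int) :
    pvPopLoop (E1 ++ E2) c l = (pvPopLoop E1 c l).bind fun r => pvPopLoop E2 r.1 r.2 := by
  induction E1 generalizing c l with
  | nil => simp [pvPopLoop]
  | cons e E1 ih =>
    simp only [List.cons_append, pvPopLoop]
    cases PySem.List.pop? c e with
    | none => rfl
    | some p =>
      cases PySem.List.pop? l e with
      | none => rfl
      | some q => exact ih p.2 q.2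

theorem pvPopLoop_shift (E : List Int) (hE : ∀ e ∈ E, 0 ≤ e) (c : String) (cs : List String)
    (x : Int) (ls : List Int) :
    pvPopLoop (E.map (· + 1)) (c :: cs) (x :: ls) =
      (pvPopLoop E cs ls).map (fun r => (c :: r.1, x :: r.2)) := by
  induction E generalizing cs ls with
  | nil => simp [pvPopLoop]
  | cons e E ih =>
    have he : 0 ≤ e := hE e (List.mem_cons_self ..)
    simp only [List.map_cons, pvPopLoop, pop?_succ _ _ e he]
    cases PySem.List.pop? cs e with
    | none => rfl
    | some p =>
      simp only [Option.map_some]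
      cases PySem.List.pop? ls e with
      | none => rfl
      | some q => exact ih (fun e' h' => hE e' (List.mem_cons_of_mem _ h')) p.2 q.2

theorem pvKeepB_all_true {cs : List String} (h : ∀ s ∈ cs, pvNE s = true) (ls : List Int) :
    pvKeepB (cs.map pvNE) ls = ls := by
  induction cs generalizing ls with
  | nil => exact pvKeepB_nil ls
  | cons c cs ih =>
    cases ls with
    | nil => rfl
    | cons x ls =>
      simp only [List.map_cons, pvKeepB, h c (List.mem_cons_self ..), if_true]
      rw [ih (fun s hs => h s (List.mem_cons_of_mem _ hs))]

theorem filter_all_true {cs : List String} (h : ∀ s ∈ cs, pvNE s = true) :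
    cs.filter pvNE = cs := List.filter_eq_self.2 h

-- the heart of the A side: under Pre_, A's pop loop succeeds and yields the filtered pair
theorem pvPopLoop_spec (corpus : List String) (labels : List Int)
    (hpre : Pre_remove_empty_text_data_fasttext corpus labels) :
    pvPopLoop (pvIdxFrom corpus 0).reverse corpus labels =
      some (corpus.filter pvNE, pvKeepB (corpus.map pvNE) labels) := by
  induction corpus generalizing labels with
  | nil => simp [pvIdxFrom, pvPopLoop, pvKeepB_nil]
  | cons c cs ih =>
    have hpre' : ∀ x ls, labels = x :: ls → Pre_remove_empty_text_data_fasttext cs ls := by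
      rintro x ls rfl i hi hempty
      have := hpre (i + 1) (by simpa using Nat.succ_lt_succ hi) (by simpa using hempty)
      simpa using this
    have hshift : pvIdxFrom (c :: cs) 0 =
        (if PySem.Str.len c == 0 then [(0:Int)] else []) ++ (pvIdxFrom cs 0).map (· + 1) := by
      have hs := pvIdxFrom_shift cs 0
      rw [zero_add] at hs
      simp only [pvIdxFrom, zero_add]
      rw [hs]
    by_cases hc : PySem.Str.len c == 0
    · -- head is empty: it is popped last (index 0), so labels must be nonempty
      have hc' : c = "" := (pvNE_false_iff c).1 (by rw [pvNE_eq_not_empty, hc]; rfl)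
      have h0 : 0 < labels.length := hpre 0 (by simp) (by simpa using hc')
      obtain ⟨x, ls, rfl⟩ : ∃ x ls, labels = x :: ls := by
        cases labels with
        | nil => simp at h0
        | cons x ls => exact ⟨x, ls, rfl⟩
      rw [hshift, if_pos hc]
      rw [List.reverse_append, ← List.map_reverse]
      rw [show ((pvIdxFrom cs 0).reverse.map (· + 1)) ++ [(0:Int)].reverse =
        ((pvIdxFrom cs 0).reverse.map (· + 1)) ++ [(0:Int)] by simp]
      rw [pvPopLoop_append]
      rw [pvPopLoop_shift _ (fun e he => pvIdxFrom_nonneg le_rfl (List.mem_reverse.1 he)) c cs x ls]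
      rw [ih ls (hpre' x ls rfl)]
      have hcne : pvNE c = false := (pvNE_false_iff c).2 hc'
      simp [pvPopLoop, PySem.List.pop?_zero_cons, pvKeepB, hcne, List.filter_cons, Option.bind]
    · -- head nonempty
      have hcne : pvNE c = true := by rw [pvNE_eq_not_empty]; simp_all
      rw [hshift, if_neg hc, List.nil_append, ← List.map_reverse]
      by_cases hE : pvIdxFrom cs 0 = []
      · -- nothing to pop at all
        have hall : ∀ s ∈ cs, pvNE s = true := (pvIdxFrom_eq_nil_iff cs 0).1 hE
        rw [hE]
        simp only [List.reverse_nil, List.map_nil, pvPopLoop]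
        rw [List.filter_cons, if_pos hcne, filter_all_true hall]
        simp only [List.map_cons]
        cases labels with
        | nil => rfl
        | cons x ls => simp [pvKeepB, hcne, pvKeepB_all_true hall]
      · -- some deeper index is empty, so labels is nonempty
        obtain ⟨i, hi, hempty⟩ : ∃ i, i < cs.length ∧ cs.getD i "" = "" := by
          by_contra hno
          push_neg at hno
          exact hE ((pvIdxFrom_eq_nil_iff cs 0).2 (by
            intro s hs
            obtain ⟨j, hj, rfl⟩ := List.getElem_of_mem hs
            by_contra hf
            have : cs.getD j "" = "" := by
              rw [List.getD_eq_getElem _ _ hj]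
              exact (pvNE_false_iff _).1 (by simpa using hf)
            exact absurd this (hno j hj)))
        have : i + 1 < labels.length := by
          apply hpre (i + 1) (by simpa using Nat.succ_lt_succ hi)
          simpa using hempty
        obtain ⟨x, ls, rfl⟩ : ∃ x ls, labels = x :: ls := by
          cases labels with
          | nil => simp at this
          | cons x ls => exact ⟨x, ls, rfl⟩
        rw [pvPopLoop_shift _ (fun e he => pvIdxFrom_nonneg le_rfl (List.mem_reverse.1 he)) c cs x ls]
        rw [ih ls (hpre' x ls rfl)]
        simp [List.filter_cons, hcne, pvKeepB]

-- A equals the match on the pop loop whatever the branch taken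
theorem pvA_eq_core (corpus : List String) (labels : List Int) :
    remove_empty_text_data_fasttext corpus labels =
      match pvPopLoop (pvIdxFrom corpus 0).reverse corpus labels with
      | some r => r
      | none => (corpus, labels) := by
  unfold remove_empty_text_data_fasttext
  rw [pvCountIdx_eq]
  by_cases h : (pvIdxFrom corpus 0).length > 0
  · simp [h]
  · have : pvIdxFrom corpus 0 = [] := by
      cases hE : pvIdxFrom corpus 0 with
      | nil => rfl
      | cons a t => rw [hE] at h; simp at h
    simp [this, pvPopLoop]

-- ===== B-side lemmas =====

-- B's descending index list as a proof-friendly structure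
def pvDesc (n : Nat) : List Int := ((List.range n).map Int.ofNat).reverse

theorem pvDesc_eq_pyRange (n : Nat) :
    PySem.List.pyRange ((n : Int) - 1) (-1) (-1) = pvDesc n := by
  rw [PySem.List.pyRange_neg_one_eq_reverse]
  have : (-1 : Int) + 1 = 0 := by ring
  rw [this, show ((n : Int) - 1) + 1 = (n : Int) by ring]
  unfold pvDesc
  rw [PySem.List.pyRange_one]
  simp

theorem pvDesc_succ (n : Nat) : pvDesc (n + 1) = (pvDesc n).map (· + 1) ++ [(0 : Int)] := by
  unfold pvDesc
  rw [List.range_succ_eq_map]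
  simp [Function.comp]

theorem pvDesc_nonneg {n : Nat} {e : Int} (he : e ∈ pvDesc n) : 0 ≤ e := by
  unfold pvDesc at he
  simp only [List.mem_reverse, List.mem_map, List.mem_range] at he
  obtain ⟨k, _, rfl⟩ := he
  exact Int.ofNat_nonneg k

theorem pvBack_shift (E : List Int) (hE : ∀ e ∈ E, 0 ≤ e) (c : String) (cs : List String)
    (x : Int) (ls : List Int) :
    pvBack (E.map (· + 1)) (c :: cs) (x :: ls) =
      (pvBack E cs ls).map (fun r => (c :: r.1, x :: r.2)) := by
  induction E generalizing cs ls with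
  | nil => simp [pvBack]
  | cons e E ih =>
    have he : 0 ≤ e := hE e (List.mem_cons_self ..)
    have ih' := ih (fun e' h' => hE e' (List.mem_cons_of_mem _ h'))
    simp only [List.map_cons, pvBack, pyGet?_succ _ _ e he]
    cases PySem.List.pyGet? cs e with
    | none => rfl
    | some s =>
      by_cases hs : PySem.Str.len s == 0
      · simp only [hs, if_true, pop?_succ _ _ e he]
        cases PySem.List.pop? cs e with
        | none => rfl
        | some p =>
          simp only [Option.map_some]
          cases PySem.List.pop? ls e with
          | none => rfl
          | some q => exact ih' p.2 q.2
      · simp only [hs, if_false]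
        exact ih' cs ls

theorem pvBack_append (E1 E2 : List Int) (c : List String) (l : List Int) :
    pvBack (E1 ++ E2) c l = (pvBack E1 c l).bind fun r => pvBack E2 r.1 r.2 := by
  induction E1 generalizing c l with
  | nil => simp [pvBack]
  | cons e E1 ih =>
    simp only [List.cons_append, pvBack]
    cases PySem.List.pyGet? c e with
    | none => rfl
    | some s =>
      by_cases hs : PySem.Str.len s == 0
      · simp only [hs, if_true]
        cases PySem.List.pop? c e with
        | none => rfl
        | some p =>
          cases PySem.List.pop? l e with
          | none => rfl
          | some q => exact ih p.2 q.2
      · simp only [hs, if_false]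
        exact ih c l

-- with no empty entries, B's sweep pops nothing and keeps both lists
theorem pvBack_nopop (E : List Int) (c : List String) (l : List Int)
    (hall : ∀ s ∈ c, pvNE s = true)
    (hE : ∀ e ∈ E, 0 ≤ e ∧ e < (c.length : Int)) :
    pvBack E c l = some (c, l) := by
  induction E with
  | nil => rfl
  | cons e E ih =>
    obtain ⟨h0, hlt⟩ := hE e (List.mem_cons_self ..)
    obtain ⟨s, hget⟩ : ∃ s, PySem.List.pyGet? c e = some s :=
      ⟨_, PySem.List.pyGet?_eq_some_getElem c h0 hlt⟩
    have hne : pvNE s = true := hall s (PySem.List.mem_of_pyGet?_eq_some c hget)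
    rw [pvNE_eq_not_empty] at hne
    simp only [pvBack, hget]
    rw [if_neg (by simp_all)]
    exact ih (fun e' h' => hE e' (List.mem_cons_of_mem _ h'))

-- the heart of the B side: under Pre_, B's backward sweep yields the same filtered pair
theorem pvBack_spec (corpus : List String) (labels : List Int)
    (hpre : Pre_remove_empty_text_data_fasttext corpus labels) :
    pvBack (pvDesc corpus.length) corpus labels =
      some (corpus.filter pvNE, pvKeepB (corpus.map pvNE) labels) := by
  induction corpus generalizing labels with
  | nil => simp [pvDesc, pvBack, pvKeepB_nil]
  | cons c cs ih =>
    have hpre' : ∀ x ls, labels = x :: ls → Pre_remove_empty_text_data_fasttext cs ls := by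
      rintro x ls rfl i hi hempty
      have := hpre (i + 1) (by simpa using Nat.succ_lt_succ hi) (by simpa using hempty)
      simpa using this
    cases labels with
    | nil =>
      -- Pre_ with no labels forces every corpus entry to be nonempty: the sweep pops nothing
      have hall : ∀ s ∈ c :: cs, pvNE s = true := by
        intro s hs
        obtain ⟨j, hj, rfl⟩ := List.getElem_of_mem hs
        by_contra hf
        have hempty : (c :: cs).getD j "" = "" := by
          rw [List.getD_eq_getElem _ _ hj]
          exact (pvNE_false_iff _).1 (by simpa using hf)
        have := hpre j hj hempty
        simp at this
      rw [pvBack_nopop _ _ _ hall (fun e he => ⟨pvDesc_nonneg he, by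
        unfold pvDesc at he
        simp only [List.mem_reverse, List.mem_map, List.mem_range] at he
        obtain ⟨k, hk, rfl⟩ := he
        simpa using hk⟩)]
      rw [filter_all_true hall]
      rfl
    | cons x ls =>
      rw [List.length_cons, pvDesc_succ, pvBack_append]
      rw [pvBack_shift _ (fun e he => pvDesc_nonneg he) c cs x ls]
      rw [ih ls (hpre' x ls rfl)]
      by_cases hc : PySem.Str.len c == 0
      · have hc' : c = "" := (pvNE_false_iff c).1 (by rw [pvNE_eq_not_empty, hc]; rfl)
        have hcne : pvNE c = false := (pvNE_false_iff c).2 hc'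
        have h0 : pvNE "" = false := (pvNE_false_iff "").2 rfl
        simp [pvBack, PySem.List.pyGet?_zero_cons, hc', h0, PySem.List.pop?_zero_cons,
          List.filter_cons, hcne, pvKeepB, Option.bind]
      · have hcne : pvNE c = true := by rw [pvNE_eq_not_empty]; simp_all
        have hc' : ¬ c = "" := fun h => by
          rw [(pvNE_false_iff c).2 h] at hcne; exact Bool.false_ne_true hcne
        simp [pvBack, PySem.List.pyGet?_zero_cons, hc', List.filter_cons, hcne, pvKeepB,
          Option.bind]

-- ===== VERDICT (by name: the statement is the Claim_ definition above) =====
theorem remove_empty_text_data_fasttext_spec : Claim_equal_remove_empty_text_data_fasttext := by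
  intro corpus labels _ hpre
  unfold Spec_remove_empty_text_data_fasttext
  rw [pvA_eq_core, pvPopLoop_spec corpus labels hpre]
  unfold remove_empty_text_data_fasttext_alt
  rw [pvDesc_eq_pyRange, pvBack_spec corpus labels hpre]
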